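-- pv_equiv track=rewrite | github.com/35eternal/phasegrid | core/cycle_dip_detector.py | _calculate_trend_lengths
-- ===== SOURCE A (Python) =====
-- def _calculate_trend_lengths(phases):
--     """
--     Calculate how many consecutive games in current trend.
--
--     Args:
--         phases (list): Trend phase labels
--
--     Returns:
--         list: Number of games in current trend
--     """
--     trend_lengths = [1] * len(phases)
--
--     for i in range(1, len(phases)):
--         if phases[i] == phases[i-1]:
--             trend_lengths[i] = trend_lengths[i-1] + 1
--         else:
--             trend_lengths[i] = 1
--
--     return trend_lengths
-- ===== SOURCE B (Python) =====
-- from itertools import groupby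
--
--
-- def _calculate_trend_lengths(phases):
--     """Run-length decomposition: split into maximal runs of equal labels,
--     emit 1..L for each run of length L."""
--     out = []
--     for _, group in groupby(phases):
--         run_len = sum(1 for _ in group)
--         out.extend(range(1, run_len + 1))
--     return out
-- ===== Notes on version B (the rewrite author's own statement) =====
-- stated objective: alternative
-- what changed: Replaces the per-index counter loop with indexed reads/writes into a preallocated list by a groupby run-length decomposition that emits range(1, L+1) for each maximal run of equal labels.
import Mathlib
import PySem

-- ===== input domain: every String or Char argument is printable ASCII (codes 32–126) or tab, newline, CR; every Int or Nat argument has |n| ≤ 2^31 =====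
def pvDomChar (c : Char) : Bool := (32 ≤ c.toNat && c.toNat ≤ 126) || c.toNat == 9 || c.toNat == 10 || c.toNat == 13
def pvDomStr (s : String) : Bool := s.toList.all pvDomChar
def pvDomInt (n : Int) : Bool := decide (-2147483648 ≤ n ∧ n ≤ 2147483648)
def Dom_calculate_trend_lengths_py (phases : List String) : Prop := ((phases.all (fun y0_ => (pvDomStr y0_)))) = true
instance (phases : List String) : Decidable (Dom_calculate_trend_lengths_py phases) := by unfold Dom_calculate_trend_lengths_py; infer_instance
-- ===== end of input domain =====

-- B replaces A's per-index counter loop (indexed writes into a preallocated list) by a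
-- run-length decomposition: maximal runs of equal labels, each expanded to 1..L. Alternative
-- decomposition of the same O(n) task; return values proved equal.

-- ===== PORT A =====
-- literal port of A's index loop: trend_lengths = [1]*n, then for i in range(1, n) set slot i.
-- pyGetD with a default is exact here: every index the loop reads/writes is in range (1 ≤ i < n).
def calculate_trend_lengths_py (phases : List String) : List Int :=
  (PySem.List.pyRange 1 (phases.length : Int) 1).foldl
    (fun tl i =>
      if PySem.List.pyGetD phases i "" == PySem.List.pyGetD phases (i - 1) "" then
        tl.set i.toNat (PySem.List.pyGetD tl (i - 1) 0 + 1)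
      else
        tl.set i.toNat 1)
    (List.replicate phases.length (1 : Int))

-- ===== PORT B =====
-- port of Source B: groupby = split off the maximal run equal to the head, emit range(1, L+1), recurse.
def calculate_trend_lengths_py_alt : List String → List Int
  | [] => []
  | x :: xs =>
    (List.range' 1 ((xs.takeWhile (· == x)).length + 1)).map (Int.ofNat ·) ++
      calculate_trend_lengths_py_alt (xs.dropWhile (· == x))
termination_by l => l.length
decreasing_by
  simp only [List.length_cons]
  exact Nat.lt_succ_of_le (List.length_dropWhile_le _ _)

-- ===== PRECONDITION & SPEC =====
def Spec_calculate_trend_lengths_py (phases : List String) (out : List Int) : Prop := out = calculate_trend_lengths_py_alt phases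
instance (phases : List String) (out : List Int) : Decidable (Spec_calculate_trend_lengths_py phases out) := by unfold Spec_calculate_trend_lengths_py; infer_instance

-- ===== CLAIM (what is proved, stated in full; the proofs are below) =====
def Claim_equal_calculate_trend_lengths_py : Prop := ∀ (phases : List String), Dom_calculate_trend_lengths_py phases → Spec_calculate_trend_lengths_py phases (calculate_trend_lengths_py phases)

-- ===== LEMMAS AND PROOFS =====

-- reference recursion: per-element counters carried as (previous label, current count)
def pvGo (prev : String) (c : Int) : List String → List Int
  | [] => []
  | x :: xs => (if x == prev then c + 1 else 1) :: pvGo x (if x == prev then c + 1 else 1) xs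

def pvSpec : List String → List Int
  | [] => []
  | x :: xs => 1 :: pvGo x 1 xs

theorem pvGo_run (x : String) (run : List String) (h : ∀ y ∈ run, y = x) :
    ∀ (c : Nat) (ys : List String),
      pvGo x (c : Int) (run ++ ys)
        = (List.range' (c + 1) run.length).map (Int.ofNat ·) ++ pvGo x ((c : Int) + run.length) ys := by
  induction run with
  | nil => intro c ys; simp
  | cons y run' ih =>
    intro c ys
    have hy : y = x := h y (by simp)
    subst hy
    have h' : ∀ z ∈ run', z = y := fun z hz => h z (by simp [hz])
    simp only [List.cons_append, pvGo, beq_self_eq_true, if_true]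
    have : (c : Int) + 1 = ((c + 1 : Nat) : Int) := by push_cast; ring
    rw [this, ih h' (c + 1) ys, List.length_cons, List.range'_succ]
    have h2 : ((c + 1 : Nat) : Int) + (run'.length : Int) = (c : Int) + ((run'.length + 1 : Nat) : Int) := by
      push_cast; ring
    rw [List.map_cons, List.cons_append, h2]
    rfl

theorem pvGo_fresh (x : String) (c : Int) (ys : List String)
    (h : ∀ y, ys.head? = some y → y ≠ x) : pvGo x c ys = pvSpec ys := by
  cases ys with
  | nil => rfl
  | cons y ys' =>
    have : (y == x) = false := by simpa using h y rfl
    simp [pvGo, pvSpec, this]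

theorem pvB_eq_spec (l : List String) : calculate_trend_lengths_py_alt l = pvSpec l := by
  fun_induction calculate_trend_lengths_py_alt l with
  | case1 => rfl
  | case2 x xs ih =>
    rw [ih]
    have hrun : ∀ y ∈ xs.takeWhile (· == x), y = x := by
      intro y hy; simpa using List.mem_takeWhile_imp hy
    have hfresh : ∀ y, (xs.dropWhile (· == x)).head? = some y → y ≠ x := by
      intro y hy
      have := List.head?_dropWhile_not (p := (· == x)) (l := xs)
      rw [hy] at this
      simpa using this
    conv_rhs => rw [show pvSpec (x :: xs) = 1 :: pvGo x 1 xs from rfl,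
      ← List.takeWhile_append_dropWhile (p := (· == x)) (l := xs)]
    rw [show (1 : Int) = ((1:Nat) : Int) from rfl, pvGo_run x _ hrun 1 _,
      pvGo_fresh _ _ _ hfresh, List.range'_succ, List.map_cons]
    simp

theorem pvGo_length (prev : String) (c : Int) (l : List String) :
    (pvGo prev c l).length = l.length := by
  induction l generalizing prev c with
  | nil => rfl
  | cons x xs ih => simp [pvGo, ih]

theorem pvSpec_length (l : List String) : (pvSpec l).length = l.length := by
  cases l with
  | nil => rfl
  | cons x xs => simp [pvSpec, pvGo_length]

theorem pvGo_getD (xs : List String) : ∀ (prev : String) (c : Int) (k : Nat), k < xs.length →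
    (pvGo prev c xs).getD k 0 =
      if xs.getD k "" == (if k = 0 then prev else xs.getD (k - 1) "") then
        (if k = 0 then c else (pvGo prev c xs).getD (k - 1) 0) + 1
      else 1 := by
  induction xs with
  | nil => intro _ _ k hk; simp at hk
  | cons x xs' ih =>
    intro prev c k hk
    cases k with
    | zero => by_cases hx : (x == prev) = true <;> simp [pvGo, hx]
    | succ j =>
      have hj : j < xs'.length := by simpa using hk
      simp only [pvGo, List.getD_cons_succ]
      rw [ih x _ j hj]
      cases j with
      | zero => simp
      | succ m => simp

theorem pvSpec_getD (phases : List String) (k : Nat) (hk1 : 1 ≤ k) (hk : k < phases.length) :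
    (pvSpec phases).getD k 0 =
      if phases.getD k "" == phases.getD (k - 1) "" then (pvSpec phases).getD (k - 1) 0 + 1
      else 1 := by
  cases phases with
  | nil => simp at hk
  | cons x xs =>
    cases k with
    | zero => omega
    | succ j =>
      have hj : j < xs.length := by simpa using hk
      simp only [pvSpec, List.getD_cons_succ]
      rw [pvGo_getD xs x 1 j hj]
      cases j with
      | zero => simp
      | succ m => simp [List.getD_cons_succ]

theorem pvA_inv (phases : List String) :
    ∀ k : Nat, 1 ≤ k → k ≤ phases.length →
      (PySem.List.pyRange 1 (k : Int) 1).foldl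
          (fun tl i =>
            if PySem.List.pyGetD phases i "" == PySem.List.pyGetD phases (i - 1) "" then
              tl.set i.toNat (PySem.List.pyGetD tl (i - 1) 0 + 1)
            else
              tl.set i.toNat 1)
          (List.replicate phases.length (1 : Int))
        = (pvSpec phases).take k ++ List.replicate (phases.length - k) 1 := by
  intro k
  induction k with
  | zero => omega
  | succ j ih =>
    intro _ hk
    cases Nat.eq_or_lt_of_le (Nat.one_le_iff_ne_zero.mpr (by omega) : 1 ≤ j + 1) with
    | inl h1 =>
      -- base: k = 1
      have hj0 : j = 0 := by omega
      subst hj0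
      rw [show ((1 : Nat) : Int) = 1 by rfl, PySem.List.pyRange_one_eq_nil (by omega)]
      cases phases with
      | nil => simp at hk
      | cons x xs =>
        simp [pvSpec, List.replicate_succ]
    | inr h1 =>
      have hj1 : 1 ≤ j := by omega
      have hjlen : j ≤ phases.length := by omega
      have hcast : ((j + 1 : Nat) : Int) = (j : Int) + 1 := by push_cast; ring
      rw [hcast, PySem.List.pyRange_one_succ_right (by omega : (1:Int) ≤ (j:Int)),
        List.foldl_append, ih hj1 hjlen]
      have hlen := pvSpec_length phases
      have htklen : ((pvSpec phases).take j).length = j := by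
        simp [hlen]; omega
      have hjm1 : ((j : Int) - 1) = ((j - 1 : Nat) : Int) := by omega
      have hrep : 0 < phases.length - j := by omega
      -- the read of tl[j-1] returns spec[j-1]
      have hread : PySem.List.pyGetD ((pvSpec phases).take j ++ List.replicate (phases.length - j) 1) ((j:Int) - 1) 0
          = (pvSpec phases).getD (j - 1) 0 := by
        rw [hjm1, PySem.List.pyGetD_natCast]
        have hlt : j - 1 < ((pvSpec phases).take j).length := by omega
        have e1 : ((pvSpec phases).take j ++ List.replicate (phases.length - j) (1:Int)).getD (j-1) 0
            = ((pvSpec phases).take j).getD (j-1) 0 := by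
          simp [List.getD, List.getElem?_append_left hlt]
        rw [e1]
        simp [List.getD, List.getElem?_take_of_lt (by omega : j - 1 < j)]
      have hset : ∀ v : Int,
          ((pvSpec phases).take j ++ List.replicate (phases.length - j) 1).set ((j:Int)).toNat v
            = (pvSpec phases).take j ++ v :: List.replicate (phases.length - (j+1)) 1 := by
        intro v
        obtain ⟨m, hm⟩ : ∃ m, phases.length - j = m + 1 := ⟨phases.length - j - 1, by omega⟩
        rw [show ((j:Int)).toNat = j from by simp,
          List.set_append_right j v (by simp [htklen]),
          htklen, Nat.sub_self, hm, List.replicate_succ, List.set_cons_zero,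
          show phases.length - (j+1) = m from by omega]
      have hspecj : (pvSpec phases).getD j 0 =
          if phases.getD j "" == phases.getD (j-1) "" then (pvSpec phases).getD (j-1) 0 + 1 else 1 :=
        pvSpec_getD phases j hj1 (by omega)
      have htake : (pvSpec phases).take (j+1) = (pvSpec phases).take j ++ [(pvSpec phases).getD j 0] := by
        rw [List.take_add_one]
        congr 1
        simp [List.getD, List.getElem?_eq_getElem (by omega : j < (pvSpec phases).length)]
      rw [hjm1] at hread
      simp only [List.foldl_cons, List.foldl_nil, PySem.List.pyGetD_natCast, hjm1, hread]
      by_cases hc : (phases.getD j "" == phases.getD (j-1) "") = true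
      · rw [if_pos hc, hset, htake, hspecj, if_pos hc]
        simp [List.append_assoc]
      · rw [if_neg hc, hset, htake, hspecj, if_neg hc]
        simp [List.append_assoc]

theorem pvA_eq_spec (l : List String) : calculate_trend_lengths_py l = pvSpec l := by
  cases hn : l.length with
  | zero =>
    have : l = [] := List.length_eq_zero_iff.mp hn
    subst this; rfl
  | succ m =>
    unfold calculate_trend_lengths_py
    have := pvA_inv l l.length (by omega) (le_refl _)
    rw [this, Nat.sub_self, List.replicate_zero, List.append_nil,
      List.take_of_length_le (by rw [pvSpec_length])]

-- ===== VERDICT (by name: the statement is the Claim_ definition above) =====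
theorem calculate_trend_lengths_py_spec : Claim_equal_calculate_trend_lengths_py := by
  intro phases _
  unfold Spec_calculate_trend_lengths_py
  rw [pvA_eq_spec, pvB_eq_spec]
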